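-- pv_equiv track=rewrite | github.com/rayhunt454/minidump-parser | minidump/artifacts.py | clean_url
-- ===== SOURCE A (Python) =====
-- def clean_url(url: str) -> str:
--     if not url:
--         return ""
--
--     cleaned = ''.join(char for char in url if 32 <= ord(char) < 127)
--
--     url_endings = [' ', '\t', '\n', '\r', '<', '>', '"', "'", '\\', ']', ')', '}']
--     end_pos = len(cleaned)
--
--     for ending in url_endings:
--         pos = cleaned.find(ending)
--         if pos != -1 and pos < end_pos:
--             end_pos = pos
--
--     if end_pos < len(cleaned):
--         cleaned = cleaned[:end_pos]
--
--     while cleaned and cleaned[-1] in ['.', ',', ';', ':', '!', '?', '-', '_', '\\']: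
--         if any(cleaned.endswith(ext) for ext in ['.com', '.ru', '.org', '.net', '.io']):
--             break
--         cleaned = cleaned[:-1]
--
--     return cleaned.strip()
-- ===== SOURCE B (Python) =====
-- def clean_url(url: str) -> str:
--     terminators = {' ', '<', '>', '"', "'", ']', ')', '}', '\\'}
--     kept = []
--     for ch in url:
--         o = ord(ch)
--         if o < 32 or o >= 127:
--             continue
--         if ch in terminators:
--             break
--         kept.append(ch)
--     cleaned = ''.join(kept)
--     while cleaned and cleaned[-1] in '.,;:!?-_\\':
--         if cleaned.endswith(('.com', '.ru', '.org', '.net', '.io')):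
--             break
--         cleaned = cleaned[:-1]
--     return cleaned.strip()
-- ===== Notes on version B (the rewrite author's own statement) =====
-- stated objective: idiomatic
-- what changed: A builds the printable-filtered string and then runs 12 separate str.find scans to compute the minimal terminator position before slicing; B does one left-to-right pass that skips non-printable characters and breaks at the first terminator, so the truncation point is found in a single early-exit scan (the trailing-punctuation trim and strip are unchanged).
import Mathlib
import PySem

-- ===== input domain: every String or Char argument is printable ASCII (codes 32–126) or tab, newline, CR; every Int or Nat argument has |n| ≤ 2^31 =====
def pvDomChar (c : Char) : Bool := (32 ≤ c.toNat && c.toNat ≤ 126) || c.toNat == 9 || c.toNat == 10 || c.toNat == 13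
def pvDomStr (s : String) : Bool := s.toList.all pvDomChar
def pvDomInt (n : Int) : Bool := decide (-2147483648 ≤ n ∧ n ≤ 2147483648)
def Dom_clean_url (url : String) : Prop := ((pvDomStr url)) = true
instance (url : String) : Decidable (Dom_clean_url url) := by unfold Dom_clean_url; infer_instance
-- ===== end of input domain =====

-- B replaces A's build-then-12-separate-finds truncation by one early-exit scan; the return value is proved equal for all strings.

-- shared by both ports: both Pythons use the same printability test, the same
-- trailing-punctuation while-loop and the same final .strip()
def pvPrintable (c : Char) : Bool := 32 ≤ c.toNat && c.toNat < 127

-- the trailing-punctuation trim loop, textually identical in Source A and Source B: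
--   while cleaned and cleaned[-1] in <punctuation>:
--       if <cleaned endswith one of '.com','.ru','.org','.net','.io'>: break
--       cleaned = cleaned[:-1]
-- cleaned[-1] on a nonempty list is getLast?; cleaned[:-1] is dropLast (exact by PySem.Str.slice_to_neg_one)
def pvTrim (l : List Char) : List Char :=
  match _h : l.getLast? with
  | none => l
  | some c =>
    if c ∈ ['.', ',', ';', ':', '!', '?', '-', '_', '\\'] then
      if [".com", ".ru", ".org", ".net", ".io"].any (fun ext => PySem.Chars.endswith l ext.toList) then l
      else pvTrim l.dropLast
    else l
termination_by l.length
decreasing_by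
  have hne : l ≠ [] := by intro h; subst h; simp at _h
  have := List.length_pos_iff.mpr hne
  simp [List.length_dropLast]; omega

-- ===== PORT A =====
def pvEndings : List Char := [' ', '\t', '\n', '\r', '<', '>', '"', '\'', '\\', ']', ')', '}']

def clean_url (url : String) : String :=
  if url = "" then "" else
  let cleaned := url.toList.filter pvPrintable
  let endPos : Int :=
    pvEndings.foldl (fun endPos ending =>
      let pos := PySem.Chars.find cleaned [ending]
      if pos ≠ -1 ∧ pos < endPos then pos else endPos) (cleaned.length : Int)
  let cleaned := if endPos < (cleaned.length : Int) then cleaned.take endPos.toNat else cleaned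
  String.ofList (PySem.Chars.strip (pvTrim cleaned))

-- ===== PORT B =====
def pvTerminators : List Char := [' ', '<', '>', '"', '\'', ']', ')', '}', '\\']

-- for ch in url: skip non-printable; break at a terminator; else keep ch
def pvScan : List Char → List Char
  | [] => []
  | c :: rest =>
    if ¬ pvPrintable c then pvScan rest
    else if c ∈ pvTerminators then []
    else c :: pvScan rest

def clean_url_alt (url : String) : String :=
  String.ofList (PySem.Chars.strip (pvTrim (pvScan url.toList)))

-- ===== PRECONDITION & SPEC =====
def Spec_clean_url (url : String) (out : String) : Prop := out = clean_url_alt url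
instance (url : String) (out : String) : Decidable (Spec_clean_url url out) := by unfold Spec_clean_url; infer_instance

-- ===== CLAIM (what is proved, stated in full; the proofs are below) =====
def Claim_equal_clean_url : Prop := ∀ (url : String), Dom_clean_url url → Spec_clean_url url (clean_url url)

-- ===== LEMMAS AND PROOFS =====

-- value each ending contributes to A's running minimum: its first position, or len if absent
def pvH (l : List Char) (e : Char) : Int :=
  if PySem.Chars.find l [e] = -1 then (l.length : Int) else PySem.Chars.find l [e]

lemma pvStep_eq (l : List Char) (es : List Char) (a : Int) (ha : a ≤ (l.length : Int)) :
    es.foldl (fun endPos ending =>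
      let pos := PySem.Chars.find l [ending]
      if pos ≠ -1 ∧ pos < endPos then pos else endPos) a
    = es.foldl (fun acc e => min acc (pvH l e)) a := by
  induction es generalizing a with
  | nil => rfl
  | cons e es ih =>
    have hle := PySem.Chars.find_le_length l [e]
    have hneg := PySem.Chars.neg_one_le_find l [e]
    have hstep : (if PySem.Chars.find l [e] ≠ -1 ∧ PySem.Chars.find l [e] < a
        then PySem.Chars.find l [e] else a) = min a (pvH l e) := by
      unfold pvH; split_ifs <;> omega
    simp only [List.foldl_cons, hstep]
    exact ih _ (by unfold pvH; split_ifs <;> omega)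

lemma pvFoldlMin_le_init (l : List Char) (es : List Char) (a : Int) :
    es.foldl (fun acc e => min acc (pvH l e)) a ≤ a := by
  induction es generalizing a with
  | nil => simp
  | cons e es ih => exact le_trans (ih _) (min_le_left _ _)

lemma pvFoldlMin_le_mem (l : List Char) (es : List Char) :
    ∀ (a : Int) (e : Char), e ∈ es → es.foldl (fun acc x => min acc (pvH l x)) a ≤ pvH l e := by
  induction es with
  | nil => intro _ _ he; cases he
  | cons e' es ih =>
    intro a e he
    rcases List.mem_cons.mp he with h | h
    · subst h; exact le_trans (pvFoldlMin_le_init l es _) (min_le_right _ _)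
    · exact ih _ e h

lemma pvLe_foldlMin (l : List Char) (es : List Char) :
    ∀ (a b : Int), b ≤ a → (∀ e ∈ es, b ≤ pvH l e) →
      b ≤ es.foldl (fun acc x => min acc (pvH l x)) a := by
  induction es with
  | nil => intro a b hb _; simpa
  | cons e es ih =>
    intro a b hb hes
    exact ih _ _ (le_min hb (hes e List.mem_cons_self))
      (fun x hx => hes x (List.mem_cons_of_mem e hx))

-- [e] is a prefix of l.drop j  ↔  l[j]? = some e
lemma pvSingle_prefix_drop (l : List Char) (e : Char) (j : Nat) :
    [e] <+: l.drop j ↔ l[j]? = some e := by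
  rw [← List.head?_drop]
  constructor
  · rintro ⟨t, ht⟩; rw [← ht]; rfl
  · intro h
    rcases hd : l.drop j with _ | ⟨c, t⟩
    · simp [hd] at h
    · simp [hd] at h; subst h; exact ⟨t, rfl⟩

-- the first position past takeWhile fails the predicate
lemma pvTakeWhile_stop (q : Char → Bool) :
    ∀ (l : List Char), ∀ _ : (l.takeWhile q).length < l.length,
      q (l[(l.takeWhile q).length]'(by omega)) = false := by
  intro l
  induction l with
  | nil => intro h; simp at h
  | cons c t ih =>
    intro h
    by_cases hc : q c
    · simp only [List.takeWhile_cons, hc, if_true, List.length_cons] at h ⊢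
      simpa using ih (by omega)
    · simp only [List.takeWhile_cons, hc] at h ⊢
      simpa using hc

-- takeWhile only depends on the predicate's values on the list
lemma pvTakeWhile_congr (l : List Char) (p q : Char → Bool) (h : ∀ x ∈ l, p x = q x) :
    l.takeWhile p = l.takeWhile q := by
  induction l with
  | nil => rfl
  | cons c t ih =>
    simp only [List.takeWhile_cons, h c List.mem_cons_self]
    split
    · rw [ih (fun x hx => h x (List.mem_cons_of_mem _ hx))]
    · rfl

-- A's end_pos is the length of the longest ending-free prefix
lemma pvEndPos_eq (l : List Char) :
    pvEndings.foldl (fun endPos ending =>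
      let pos := PySem.Chars.find l [ending]
      if pos ≠ -1 ∧ pos < endPos then pos else endPos) (l.length : Int)
    = ((l.takeWhile (fun c => !(pvEndings.contains c))).length : Int) := by
  set q : Char → Bool := fun c => !(pvEndings.contains c) with hq
  set p : Nat := (l.takeWhile q).length with hp
  have hple : p ≤ l.length := (List.takeWhile_prefix q).length_le
  rw [pvStep_eq l pvEndings _ (le_refl _)]
  have hge : ∀ e ∈ pvEndings, (p : Int) ≤ pvH l e := by
    intro e he
    unfold pvH
    split_ifs with hf
    · exact_mod_cast hple
    · have h0 : 0 ≤ PySem.Chars.find l [e] := by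
        have := PySem.Chars.neg_one_le_find l [e]; omega
      obtain ⟨hpre, _⟩ := PySem.Chars.find_spec (s := l) (sub := [e]) h0
      by_contra hlt
      set j : Nat := (PySem.Chars.find l [e]).toNat with hj
      have hjp : j < p := by omega
      have hjl : j < l.length := by omega
      have hget : l[j]? = some e := (pvSingle_prefix_drop _ _ _).mp hpre
      have hgete : l[j]'hjl = e := by
        rw [List.getElem?_eq_getElem hjl] at hget; exact Option.some.inj hget
      have hqe : q (l[j]'hjl) = true := by
        have h1 : q ((l.takeWhile q)[j]'hjp) = true :=
          List.mem_takeWhile_imp (List.getElem_mem hjp)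
        rwa [List.IsPrefix.getElem (List.takeWhile_prefix q) hjp] at h1
      rw [hgete] at hqe
      simp only [hq, Bool.not_eq_eq_eq_not, Bool.not_true, List.contains_eq_mem,
        decide_eq_false_iff_not] at hqe
      exact hqe he
  by_cases hcase : p < l.length
  · have hstop : q (l[p]'hcase) = false := pvTakeWhile_stop q l (by omega)
    have hmem : l[p]'hcase ∈ pvEndings := by
      simpa [hq, List.contains_eq_mem] using hstop
    have hpref : [l[p]'hcase] <+: l.drop p :=
      (pvSingle_prefix_drop l _ p).mpr (by simp)
    have hfind : 0 ≤ PySem.Chars.find l [l[p]'hcase] := by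
      rw [PySem.Chars.find_nonneg_iff, ← PySem.Chars.isIn_iff_infix,
        ← PySem.Chars.exists_prefix_drop_iff_isIn]
      exact ⟨p, hpref⟩
    have hHle : pvH l (l[p]'hcase) ≤ (p : Int) := by
      unfold pvH
      split_ifs with hf
      · omega
      · obtain ⟨_, hfirst⟩ := PySem.Chars.find_spec (s := l) (sub := [l[p]'hcase]) hfind
        by_contra hgt
        exact hfirst p (by omega) hpref
    have h1 := le_trans (pvFoldlMin_le_mem l pvEndings (l.length : Int) _ hmem) hHle
    have h2 := pvLe_foldlMin l pvEndings (l.length : Int) (p : Int) (by exact_mod_cast hple) hge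
    omega
  · have hpl : p = l.length := by omega
    have h1 := pvFoldlMin_le_init l pvEndings (l.length : Int)
    have h2 := pvLe_foldlMin l pvEndings (l.length : Int) (p : Int) (by exact_mod_cast hple) hge
    omega

-- B's scan is takeWhile-not-terminator of the printable filter
lemma pvScan_eq (l : List Char) :
    pvScan l = (l.filter pvPrintable).takeWhile (fun c => !(pvTerminators.contains c)) := by
  induction l with
  | nil => rfl
  | cons c t ih =>
    by_cases hc : pvPrintable c
    · by_cases ht : c ∈ pvTerminators
      · simp [pvScan, hc, ht, List.contains_eq_mem]
      · simp [pvScan, hc, ht, List.contains_eq_mem, ih]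
    · simp [pvScan, hc, ih]

-- on printable characters the 12-element ending list and the 9-element terminator set agree
lemma pvPred_agree (c : Char) (hc : pvPrintable c = true) :
    (!(pvEndings.contains c)) = (!(pvTerminators.contains c)) := by
  have : (c ∈ pvEndings) ↔ (c ∈ pvTerminators) := by
    constructor
    · intro h
      simp only [pvEndings, List.mem_cons, List.not_mem_nil, or_false] at h
      rcases h with rfl | rfl | rfl | rfl | rfl | rfl | rfl | rfl | rfl | rfl | rfl | rfl <;>
        first
          | (exact absurd hc (by decide))
          | (simp [pvTerminators])
    · intro h
      simp only [pvTerminators, List.mem_cons, List.not_mem_nil, or_false] at h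
      rcases h with rfl | rfl | rfl | rfl | rfl | rfl | rfl | rfl | rfl <;> simp [pvEndings]
  simp [List.contains_eq_mem, this]

-- the two truncations agree
lemma pvTrunc_eq (ul : List Char) :
    (let cleaned := ul.filter pvPrintable
     let endPos : Int :=
       pvEndings.foldl (fun endPos ending =>
         let pos := PySem.Chars.find cleaned [ending]
         if pos ≠ -1 ∧ pos < endPos then pos else endPos) (cleaned.length : Int)
     if endPos < (cleaned.length : Int) then cleaned.take endPos.toNat else cleaned)
    = pvScan ul := by
  simp only [pvScan_eq]
  set l : List Char := ul.filter pvPrintable with hl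
  have hagree : l.takeWhile (fun c => !(pvTerminators.contains c))
      = l.takeWhile (fun c => !(pvEndings.contains c)) := by
    refine (pvTakeWhile_congr l _ _ ?_).symm
    intro x hx
    exact pvPred_agree x (List.of_mem_filter hx)
  rw [hagree, pvEndPos_eq]
  set p : Nat := (l.takeWhile (fun c => !(pvEndings.contains c))).length with hp
  have hple : p ≤ l.length := (List.takeWhile_prefix _).length_le
  have htake : l.takeWhile (fun c => !(pvEndings.contains c)) = l.take p :=
    List.prefix_iff_eq_take.mp (List.takeWhile_prefix _)
  by_cases hcase : (p : Int) < (l.length : Int)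
  · simp only [hcase, if_true, Int.toNat_natCast]
    exact htake.symm
  · simp only [hcase, if_false]
    have : p = l.length := by omega
    rw [htake, this, List.take_length]

-- ===== VERDICT (by name: the statement is the Claim_ definition above) =====
theorem clean_url_spec : Claim_equal_clean_url := by
  intro url _
  unfold Spec_clean_url clean_url clean_url_alt
  by_cases hu : url = ""
  · subst hu
    rw [if_pos rfl]
    show ("" : String) = String.ofList (PySem.Chars.strip (pvTrim (pvScan [])))
    rw [show pvScan [] = [] from rfl, pvTrim]
    rfl
  · simp only [hu, if_false]
    rw [pvTrunc_eq url.toList]
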